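-- pv_equiv track=rewrite | github.com/PeopleAndService/AlgorithmStudy | jaeseuk/pypython/Programmers/level1/신규 아이디 추천.py | solution
-- ===== SOURCE A (Python) =====
-- import string
--
-- def solution(new_id):
--     new_id = new_id.lower()
--     available = string.digits + string.ascii_lowercase + '-_.'
--     answer = []
--
--     for ch in new_id:
--         if ch in available:
--             if answer and answer[-1] == '.' and ch == '.':
--                 continue
--             elif not answer and ch == '.':
--                 continue
--             else:
--                 answer.append(ch)
--
--     if answer and answer[-1] == '.':
--         answer.pop()
--
--     if not answer:
--         answer.append('a')
--
--     if len(answer) >= 16: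
--         answer = answer[:15]
--
--     if len(answer) <= 2:
--         for _ in range(3 - len(answer)):
--             answer.append(answer[-1])
--
--     if answer[-1] == '.':
--         answer.pop()
--
--     return ''.join(answer)
-- ===== SOURCE B (Python) =====
-- def solution(new_id):
--     s = ''.join(c for c in new_id.lower() if c in '0123456789abcdefghijklmnopqrstuvwxyz-_.')
--     s = '.'.join(p for p in s.split('.') if p) or 'a'
--     s = s[:15].rstrip('.')
--     return s if len(s) >= 3 else s + s[-1] * (3 - len(s))
-- ===== Notes on version B (the rewrite author's own statement) =====
-- stated objective: idiomatic
-- what changed: Replaces A's single stateful character-accumulation loop (with in-loop dot-collapsing and leading-dot skipping) by the standard pipeline of whole-string operations: filter allowed characters, split on the dot separator and rejoin the nonempty pieces (which collapses runs of dots and strips boundary dots in one step), fall back to the default letter if empty, truncate to 15 and right-strip a trailing dot, then pad with the last character up to length 3.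
import Mathlib
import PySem

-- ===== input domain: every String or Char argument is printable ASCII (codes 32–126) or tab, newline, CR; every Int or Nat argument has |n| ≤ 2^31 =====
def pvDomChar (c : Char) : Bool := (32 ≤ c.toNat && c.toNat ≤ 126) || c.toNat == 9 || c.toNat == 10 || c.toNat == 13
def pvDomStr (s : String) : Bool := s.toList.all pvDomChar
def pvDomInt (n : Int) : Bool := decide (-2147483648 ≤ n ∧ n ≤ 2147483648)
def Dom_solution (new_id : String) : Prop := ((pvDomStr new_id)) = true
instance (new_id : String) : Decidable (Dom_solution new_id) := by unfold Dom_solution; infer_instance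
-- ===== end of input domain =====

-- B replaces A's stateful character-accumulation loop by the idiomatic filter / split-rejoin / truncate-rstrip / pad pipeline of string operations.

-- ===== PORT A =====
def solution (new_id : String) : String :=
  -- new_id = new_id.lower()
  let lowered : List Char := PySem.Chars.lower new_id.toList
  -- available = string.digits + string.ascii_lowercase + '-_.'
  let available : List Char := "0123456789abcdefghijklmnopqrstuvwxyz-_.".toList
  -- for ch in new_id: ...   ('ch in available' is single-character membership)
  let answer : List Char := lowered.foldl (fun answer ch =>
    if available.contains ch then
      if answer ≠ [] ∧ answer.getLast? = some '.' ∧ ch = '.' then answer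
      else if answer = [] ∧ ch = '.' then answer
      else answer ++ [ch]
    else answer) []
  -- if answer and answer[-1] == '.': answer.pop()
  let answer := if answer ≠ [] ∧ answer.getLast? = some '.' then answer.dropLast else answer
  -- if not answer: answer.append('a')
  let answer := if answer = [] then answer ++ ['a'] else answer
  -- if len(answer) >= 16: answer = answer[:15]
  let answer := if 16 ≤ answer.length then PySem.List.slice answer none (some 15) else answer
  -- if len(answer) <= 2: for _ in range(3 - len(answer)): answer.append(answer[-1])
  -- (answer is nonempty here, so answer[-1] never raises; .getD 'a' is unreachable)
  let answer := if answer.length ≤ 2 then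
      (List.range (3 - answer.length)).foldl (fun answer _ =>
        answer ++ [(PySem.List.pyGet? answer (-1)).getD 'a']) answer
    else answer
  -- if answer[-1] == '.': answer.pop()   (answer has length ≥ 3 here, never raises)
  let answer := if PySem.List.pyGet? answer (-1) = some '.' then answer.dropLast else answer
  -- return ''.join(answer)
  String.ofList answer

-- ===== PORT B =====
-- exact port of Python str.rstrip('.') (drop trailing '.' characters)
def rstripDot (l : List Char) : List Char := (l.reverse.dropWhile (fun c => c == '.')).reverse

def solution_alt (new_id : String) : String :=
  -- s = ''.join(c for c in new_id.lower() if c in '0123456789abcdefghijklmnopqrstuvwxyz-_.')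
  let s : List Char := (PySem.Chars.lower new_id.toList).filter
      (fun c => "0123456789abcdefghijklmnopqrstuvwxyz-_.".toList.contains c)
  -- s = '.'.join(p for p in s.split('.') if p) or 'a'
  let s := PySem.Chars.join ['.'] ((PySem.Chars.splitOn s ['.']).filter (fun p => p ≠ []))
  let s := if s = [] then ['a'] else s
  -- s = s[:15].rstrip('.')
  let s := rstripDot (PySem.List.slice s none (some 15))
  -- return s if len(s) >= 3 else s + s[-1] * (3 - len(s))   (s is nonempty, s[-1] never raises)
  String.ofList (if 3 ≤ s.length then s
    else s ++ List.replicate (3 - s.length) ((PySem.List.pyGet? s (-1)).getD 'a'))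

-- ===== PRECONDITION & SPEC =====
def Spec_solution (new_id : String) (out : String) : Prop := out = solution_alt new_id
instance (new_id : String) (out : String) : Decidable (Spec_solution new_id out) := by unfold Spec_solution; infer_instance

-- ===== CLAIM (what is proved, stated in full; the proofs are below) =====
def Claim_equal_solution : Prop := ∀ (new_id : String), Dom_solution new_id → Spec_solution new_id (solution new_id)

-- ===== LEMMAS AND PROOFS =====

-- proof-side names for the stages of each port (definitionally equal to the port bodies)
def aLoop (cs : List Char) : List Char :=
  (PySem.Chars.lower cs).foldl (fun answer ch =>
    if ("0123456789abcdefghijklmnopqrstuvwxyz-_.".toList).contains ch then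
      if answer ≠ [] ∧ answer.getLast? = some '.' ∧ ch = '.' then answer
      else if answer = [] ∧ ch = '.' then answer
      else answer ++ [ch]
    else answer) []
def aPop (l : List Char) : List Char := if l ≠ [] ∧ l.getLast? = some '.' then l.dropLast else l
def aFallback (l : List Char) : List Char := if l = [] then l ++ ['a'] else l
def aTrunc (l : List Char) : List Char := if 16 ≤ l.length then PySem.List.slice l none (some 15) else l
def aPad (l : List Char) : List Char :=
  if l.length ≤ 2 then
    (List.range (3 - l.length)).foldl (fun answer _ =>
      answer ++ [(PySem.List.pyGet? answer (-1)).getD 'a']) l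
  else l
def aFin (l : List Char) : List Char := if PySem.List.pyGet? l (-1) = some '.' then l.dropLast else l
def bPre (cs : List Char) : List Char :=
  PySem.Chars.join ['.'] ((PySem.Chars.splitOn ((PySem.Chars.lower cs).filter
    (fun c => "0123456789abcdefghijklmnopqrstuvwxyz-_.".toList.contains c)) ['.']).filter (fun p => p ≠ []))
def bFb (l : List Char) : List Char := if l = [] then ['a'] else l
def bFinal (s : List Char) : List Char :=
  if 3 ≤ s.length then s else s ++ List.replicate (3 - s.length) ((PySem.List.pyGet? s (-1)).getD 'a')

-- A's in-loop dot logic as a two-state recursion: the Bool says "a '.' may be appended"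
def gsim : Bool → List Char → List Char
  | _, [] => []
  | b, c :: r => if c = '.' then (if b then '.' :: gsim false r else gsim b r) else c :: gsim true r

-- structural version of s.split('.'): first piece and remaining pieces
def spD : List Char → List Char × List (List Char)
  | [] => ([], [])
  | c :: r => if c = '.' then ([], (spD r).1 :: (spD r).2) else (c :: (spD r).1, (spD r).2)

def partsD (l : List Char) : List (List Char) := (spD l).1 :: (spD l).2

-- '.'-join of the nonempty pieces
def jne : List (List Char) → List Char
  | [] => []
  | p :: t => if p = [] then jne t else p ++ (if jne t = [] then [] else '.' :: jne t)

-- no two adjacent dots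
def nddB : List Char → Bool
  | a :: b :: r => !(a == '.' && b == '.') && nddB (b :: r)
  | _ => true

theorem pyGet_neg_one (l : List Char) : PySem.List.pyGet? l (-1) = l.getLast? := by
  simp [PySem.List.pyGet?, PySem.List.pyIdx?]
  rcases l with _ | ⟨c, r⟩
  · simp
  · simp [List.getLast?_eq_getElem?]

theorem lastCons (a : Char) (q : List Char) (hq : q ≠ []) :
    (a :: q).getLast? = q.getLast? := by
  cases q with
  | nil => exact absurd rfl hq
  | cons b r => simp [List.getLast?_cons_cons]

theorem foldl_loop_g (l : List Char) (acc : List Char) :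
    l.foldl (fun answer ch =>
      if answer ≠ [] ∧ answer.getLast? = some '.' ∧ ch = '.' then answer
      else if answer = [] ∧ ch = '.' then answer
      else answer ++ [ch]) acc
    = acc ++ gsim (!acc.isEmpty && !(acc.getLast? == some '.')) l := by
  induction l generalizing acc with
  | nil => simp [gsim]
  | cons c r ih =>
    simp only [List.foldl_cons]
    by_cases hc : c = '.'
    · subst hc
      by_cases ha : acc = []
      · subst ha
        simp only [ne_eq, not_true_eq_false, false_and, if_false]
        rw [if_pos (by simp), ih]
        simp [gsim]
      · by_cases hd : acc.getLast? = some '.'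
        · rw [if_pos ⟨ha, hd, rfl⟩, ih]
          simp [gsim, ha, hd]
        · rw [if_neg (by tauto), if_neg (by tauto), ih]
          have hd' : ((acc ++ ['.']).getLast? == some '.') = true := by
            simp [List.getLast?_concat]
          simp [gsim, ha, hd, hd', List.isEmpty_iff]
    · rw [if_neg (by tauto), if_neg (by tauto), ih]
      have hc' : (c == '.') = false := by simp [hc]
      have he : (acc ++ [c]).isEmpty = false := by simp
      simp [gsim, hc, hc', he, List.getLast?_concat]

theorem go_sp (fuel : Nat) (l cur : List Char) (acc : List (List Char)) (h : l.length < fuel) :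
    PySem.Chars.splitOn.go ['.'] fuel l cur acc
      = acc.reverse ++ (cur.reverse ++ (spD l).1) :: (spD l).2 := by
  induction fuel generalizing l cur acc with
  | zero => omega
  | succ f ih =>
    cases l with
    | nil => simp [PySem.Chars.splitOn.go, spD]
    | cons c r =>
      by_cases hc : c = '.'
      · subst hc
        rw [PySem.Chars.splitOn.go]
        simp only [List.isPrefixOf, List.length_cons] at *
        rw [if_pos (by simp)]
        simp only [List.drop_succ_cons, List.drop_zero]
        simp only [List.length_nil, List.drop_zero]
        rw [ih r [] (cur.reverse :: acc) (by simpa using h)]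
        simp [spD]
      · rw [PySem.Chars.splitOn.go]
        have hp : (['.'].isPrefixOf (c :: r)) ≠ true := by
          simp [List.isPrefixOf]
          exact fun e => hc e.symm
        rw [if_neg hp]
        rw [ih r (c :: cur) acc (by simp at h ⊢; omega)]
        simp [spD, hc]

theorem splitOn_eq (l : List Char) :
    PySem.Chars.splitOn l ['.'] = (spD l).1 :: (spD l).2 := by
  rw [PySem.Chars.splitOn, go_sp _ _ _ _ (by omega)]
  simp

theorem join_ne_nil (q : List Char) (rest : List (List Char)) (h : q ≠ []) :
    PySem.Chars.join ['.'] (q :: rest) ≠ [] := by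
  cases rest with
  | nil => simpa [PySem.Chars.join_singleton] using h
  | cons b t => simp [PySem.Chars.join_cons_cons, h]

theorem join_filter_eq_jne (parts : List (List Char)) :
    PySem.Chars.join ['.'] (parts.filter (fun p => p ≠ [])) = jne parts := by
  induction parts with
  | nil => simp [jne, PySem.Chars.join_nil]
  | cons p t ih =>
    by_cases hp : p = []
    · subst hp
      rw [List.filter_cons_of_neg (by simp), ih]
      simp [jne]
    · rw [List.filter_cons_of_pos (by simpa using hp)]
      rcases hf : t.filter (fun p => p ≠ []) with _ | ⟨q, rest⟩
      · have : jne t = [] := by rw [← ih, hf, PySem.Chars.join_nil]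
        simp [jne, hp, this, hf, PySem.Chars.join_singleton]
      · have hq : q ≠ [] := by
          have := List.of_mem_filter (a := q) (l := t) (p := fun p => p ≠ [])
            (by rw [hf]; exact List.mem_cons_self)
          simpa using this
        have hjt : jne t ≠ [] := by rw [← ih, hf]; exact join_ne_nil q rest hq
        rw [PySem.Chars.join_cons_cons, ← hf, ih]
        simp [jne, hp, hjt]

theorem spD_dotfree (l : List Char) :
    ('.' ∉ (spD l).1) ∧ (∀ p ∈ (spD l).2, '.' ∉ p) := by
  induction l with
  | nil => simp [spD]
  | cons c r ih =>
    by_cases hc : c = '.'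
    · subst hc
      simp only [spD]
      refine ⟨by simp, fun p hp => ?_⟩
      rcases List.mem_cons.mp hp with h1 | h2
      · rw [h1]; exact ih.1
      · exact ih.2 p h2
    · simp only [spD, if_neg hc, List.mem_cons]
      refine ⟨?_, ih.2⟩
      simp only [List.mem_cons, not_or]
      exact ⟨fun e => hc e.symm, ih.1⟩

theorem partsD_dotfree (l : List Char) : ∀ p ∈ partsD l, '.' ∉ p := by
  intro p hp
  rcases List.mem_cons.mp hp with h1 | h2
  · rw [h1]; exact (spD_dotfree l).1
  · exact (spD_dotfree l).2 p h2

theorem spD_fst_ne_nil_head (l : List Char) (h : (spD l).1 ≠ []) : l.head? ≠ some '.' := by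
  cases l with
  | nil => simp
  | cons c r =>
    by_cases hc : c = '.'
    · subst hc; simp [spD] at h
    · simpa using hc

theorem dotfree_ndd (l : List Char) (h : '.' ∉ l) : nddB l = true := by
  induction l with
  | nil => simp [nddB]
  | cons a t ih =>
    cases t with
    | nil => simp [nddB]
    | cons b r =>
      simp only [List.mem_cons, not_or] at h
      have := ih (by simp [List.mem_cons]; tauto)
      simp [nddB, this]
      left
      exact fun e => h.1 e.symm

theorem ndd_append (p q : List Char) (hp : '.' ∉ p) (hq : q.head? ≠ some '.')
    (hq2 : nddB q = true) : nddB (p ++ '.' :: q) = true := by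
  induction p with
  | nil =>
    cases q with
    | nil => simp [nddB]
    | cons b r =>
      have hb : (b == '.') = false := by
        simp; intro e; exact hq (by simp [e])
      simp [nddB, hb, hq2]
  | cons a p' ih =>
    cases p' with
    | nil =>
      have ha : (a == '.') = false := by simp at hp ⊢; exact fun e => hp e.symm
      simpa [nddB, ha] using ih (by simp)
    | cons a2 p'' =>
      simp only [List.mem_cons, not_or] at hp
      have h2 := ih (by simp [List.mem_cons]; tauto)
      have ha : (a == '.') = false := by simp; exact fun e => hp.1 e.symm
      simp only [List.cons_append] at *
      simp [nddB, ha, h2]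

theorem jne_shape (parts : List (List Char)) (h : ∀ p ∈ parts, '.' ∉ p) :
    (jne parts).head? ≠ some '.' ∧ (jne parts).getLast? ≠ some '.' ∧ nddB (jne parts) = true := by
  induction parts with
  | nil => simp [jne, nddB]
  | cons p t ih =>
    have iht := ih (fun q hq => h q (List.mem_cons_of_mem _ hq))
    have hp : '.' ∉ p := h p List.mem_cons_self
    by_cases hpe : p = []
    · simpa [jne, hpe] using iht
    · by_cases hjt : jne t = []
      · have hred : jne (p :: t) = p := by simp [jne, if_neg hpe, hjt]
        rw [hred]
        refine ⟨?_, ?_, dotfree_ndd p hp⟩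
        · cases p with
          | nil => simp
          | cons a p' =>
            simp only [List.head?_cons, ne_eq, Option.some_inj]
            exact fun e => hp (by simp [e])
        · intro hl
          exact hp (List.mem_of_getLast? hl)
      · simp only [jne, if_neg hpe, if_neg hjt]
        refine ⟨?_, ?_, ndd_append p (jne t) hp iht.1 iht.2.2⟩
        · cases p with
          | nil => exact absurd rfl hpe
          | cons a p' =>
            simp only [List.cons_append, List.head?_cons, ne_eq, Option.some_inj]
            exact fun e => hp (by simp [e])
        · rw [List.getLast?_append, lastCons '.' (jne t) hjt]
          rcases hg : (jne t).getLast? with _ | g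
          · exact absurd (List.getLast?_eq_none_iff.mp hg) hjt
          · intro e
            rw [Option.or] at e
            injection e with e'
            subst e'
            exact iht.2.1 hg

theorem jne_nil_alldot (l : List Char) (h : jne (partsD l) = []) : ∀ c ∈ l, c = '.' := by
  induction l with
  | nil => simp
  | cons c r ih =>
    by_cases hc : c = '.'
    · subst hc
      intro d hd
      rcases List.mem_cons.mp hd with rfl | hd2
      · rfl
      · refine ih ?_ d hd2
        simpa [partsD, spD, jne] using h
    · exfalso
      simp only [partsD, spD, if_neg hc] at h
      simp [jne] at h

theorem alldot_last (x : List Char) (h : ∀ c ∈ x, c = '.') :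
    (('.' : Char) :: x).getLast? = some '.' := by
  induction x with
  | nil => simp
  | cons a r ih =>
    have ha : a = '.' := h a (by simp)
    subst ha
    rw [List.getLast?_cons_cons]
    exact ih (fun c hc => h c (List.mem_cons_of_mem _ hc))

theorem gsim_true (l : List Char) :
    gsim true l = (if l.head? = some '.' then ['.'] else []) ++ gsim false l := by
  cases l with
  | nil => simp [gsim]
  | cons c r =>
    by_cases hc : c = '.'
    · subst hc; simp [gsim]
    · simp [gsim, hc]

theorem gsim_false_eq (l : List Char) :
    gsim false l = jne (partsD l)
      ++ (if jne (partsD l) ≠ [] ∧ l.getLast? = some '.' then ['.'] else []) := by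
  induction l with
  | nil => simp [gsim, partsD, spD, jne]
  | cons c r ih =>
    by_cases hc : c = '.'
    · subst hc
      have hp : partsD ('.' :: r) = [] :: partsD r := by simp [partsD, spD]
      have hj : jne (partsD ('.' :: r)) = jne (partsD r) := by rw [hp]; simp [jne]
      have hg : gsim false ('.' :: r) = gsim false r := by simp [gsim]
      rw [hg, hj, ih]
      by_cases hjr : jne (partsD r) = []
      · simp [hjr]
      · have hr : r ≠ [] := by
          intro e; subst e; simp [partsD, spD, jne] at hjr
        rw [lastCons '.' r hr]
    · have hsp : spD (c :: r) = (c :: (spD r).1, (spD r).2) := by simp [spD, hc]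
      have hg : gsim false (c :: r) = c :: gsim true r := by simp [gsim, hc]
      rw [hg, gsim_true, ih]
      cases hr0 : r with
      | nil =>
        subst hr0
        simp [partsD, spD, hc, jne]
      | cons d r' =>
        rw [← hr0]
        have hrne : r ≠ [] := by rw [hr0]; simp
        have hlast : (c :: r).getLast? = r.getLast? := lastCons c r hrne
        by_cases hh : (spD r).1 = []
        · have hd : d = '.' := by
            by_contra hd
            rw [hr0] at hh; simp [spD, hd] at hh
          have hhead : r.head? = some '.' := by rw [hr0, hd]; simp
          have ht : (spD r).2 = partsD r' := by
            rw [hr0, hd]; simp [spD, partsD]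
          have hjr : jne (partsD r) = jne (partsD r') := by
            simp [partsD, jne, hh, ht]
          have hJ : jne (partsD (c :: r))
              = [c] ++ (if jne (partsD r') = [] then [] else '.' :: jne (partsD r')) := by
            simp only [partsD, hsp, hh, ht]
            simp [jne]
          by_cases hjt : jne (partsD r') = []
          · have halldot : r.getLast? = some '.' := by
              rw [hr0, hd]
              exact alldot_last r' (jne_nil_alldot r' hjt)
            rw [hJ, hjr]
            simp only [hjt, hhead, hlast, halldot]
            simp
          · rw [hJ, hjr]
            by_cases hld : r.getLast? = some '.'
            · simp [hld, hjt, hhead, hlast]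
            · simp [hld, hjt, hhead, hlast]
        · have hhead : r.head? ≠ some '.' := spD_fst_ne_nil_head r hh
          have hjr : jne (partsD r)
              = (spD r).1 ++ (if jne ((spD r).2) = [] then [] else '.' :: jne ((spD r).2)) := by
            simp [partsD, jne, hh]
          have hjrne : jne (partsD r) ≠ [] := by
            rw [hjr]; simp [hh]
          have hJ : jne (partsD (c :: r))
              = c :: ((spD r).1 ++ (if jne ((spD r).2) = [] then [] else '.' :: jne ((spD r).2))) := by
            simp only [partsD, hsp]
            simp [jne]
          rw [hJ, ← hjr]
          simp only [if_neg (fun e => hhead e), hlast, hjrne, ne_eq, not_false_iff, true_and]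
          by_cases hld : r.getLast? = some '.'
          · simp [hld]
          · simp [hld]

theorem nddB_take (l : List Char) (n : Nat) (h : nddB l = true) : nddB (l.take n) = true := by
  induction l generalizing n with
  | nil => simp [nddB]
  | cons a r ih =>
    cases n with
    | zero => simp [nddB]
    | succ m =>
      cases r with
      | nil => cases m <;> simp [nddB]
      | cons b r' =>
        simp only [nddB, Bool.and_eq_true] at h
        cases m with
        | zero => simp [nddB]
        | succ m' =>
          have := ih (m' + 1) h.2
          simp only [List.take_succ_cons, nddB, Bool.and_eq_true] at this ⊢
          exact ⟨h.1, this⟩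

theorem rstrip_no_dot (l : List Char) (h : l.getLast? ≠ some '.') : rstripDot l = l := by
  unfold rstripDot
  rcases hr : l.reverse with _ | ⟨a, m⟩
  · simp at hr; simp [hr]
  · have ha : (a == '.') = false := by
      have : l.getLast? = some a := by
        rw [← List.head?_reverse, hr]; simp
      simp only [beq_eq_false_iff_ne, ne_eq]
      intro e; subst e; exact h this
    rw [List.dropWhile_cons_of_neg (by simp [ha])]
    rw [← hr, List.reverse_reverse]

theorem rstrip_one_dot (l : List Char) (h : l.getLast? = some '.') (hn : nddB l = true) :
    rstripDot l = l.dropLast := by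
  unfold rstripDot
  rcases hr : l.reverse with _ | ⟨a, m⟩
  · simp at hr; subst hr; simp at h
  · have ha : a = '.' := by
      have : l.getLast? = some a := by rw [← List.head?_reverse, hr]; simp
      rw [h] at this; injection this with e; exact e.symm
    subst ha
    rw [List.dropWhile_cons_of_pos (by simp)]
    have hm : m.dropWhile (fun c => c == '.') = m := by
      rcases hm2 : m with _ | ⟨b, m'⟩
      · simp
      · have hb : (b == '.') = false := by
          have hl : l = (m'.reverse ++ [b]) ++ ['.'] := by
            have := congrArg List.reverse hr
            simpa [hm2] using this
          by_contra hbe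
          simp only [beq_eq_false_iff_ne, ne_eq, not_not] at hbe
          subst hbe
          rw [hl] at hn
          have : ∀ (p : List Char), nddB (p ++ ['.'] ++ ['.']) = false := by
            intro p
            induction p with
            | nil => simp [nddB]
            | cons x p' ihp =>
              cases p' with
              | nil => simp [nddB]
              | cons y p'' =>
                simp only [List.cons_append, nddB, Bool.and_eq_false_iff] at ihp ⊢
                right
                simpa using ihp
          rw [this] at hn
          exact absurd hn (by simp)
        rw [List.dropWhile_cons_of_neg (by simp [hb])]
    rw [hm]
    have : l.dropLast = m.reverse := by
      have := congrArg List.reverse hr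
      simp at this
      subst this
      simp
    rw [this]

theorem pad_foldl (k : Nat) (a : List Char) (h : a ≠ []) :
    (List.range k).foldl (fun ans _ => ans ++ [(PySem.List.pyGet? ans (-1)).getD 'a']) a
      = a ++ List.replicate k (a.getLast?.getD 'a') := by
  induction k with
  | zero => simp
  | succ m ih =>
    rw [List.range_succ, List.foldl_append, ih]
    simp only [List.foldl_cons, List.foldl_nil, pyGet_neg_one]
    have hlast : (a ++ List.replicate m (a.getLast?.getD 'a')).getLast?
        = some (a.getLast?.getD 'a') := by
      cases m with
      | zero =>
        simp only [List.replicate_zero, List.append_nil]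
        rcases hg : a.getLast? with _ | g
        · exact absurd (List.getLast?_eq_none_iff.mp hg) h
        · simp
      | succ m' =>
        rw [List.getLast?_append, List.getLast?_replicate]
        simp
    rw [hlast]
    simp [List.replicate_succ']

-- the shared tail of the two pipelines: truncate to 15, handle the trailing dot, pad to length 3
theorem tail_eq (s2 : List Char) (hne : s2 ≠ []) (hlastd : s2.getLast? ≠ some '.')
    (hndd : nddB s2 = true) :
    aFin (aPad (aTrunc s2)) = bFinal (rstripDot (PySem.List.slice s2 none (some 15))) := by
  have hslice : PySem.List.slice s2 none (some 15) = s2.take 15 :=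
    PySem.List.slice_to s2 (by norm_num)
  have ha3 : aTrunc s2 = s2.take 15 := by
    unfold aTrunc
    by_cases h16 : 16 ≤ s2.length
    · simp [h16, hslice]
    · rw [if_neg h16, List.take_of_length_le (show s2.length ≤ 15 by omega)]
  have htne : s2.take 15 ≠ [] := by
    intro hcon
    rcases List.take_eq_nil_iff.mp hcon with h | h
    · omega
    · exact hne h
  rw [ha3, hslice]
  by_cases hlt : (s2.take 15).getLast? = some '.'
  · have h16 : 16 ≤ s2.length := by
      by_contra h16
      rw [List.take_of_length_le (show s2.length ≤ 15 by omega)] at hlt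
      exact hlastd hlt
    have hlen : (s2.take 15).length = 15 := by rw [List.length_take]; omega
    rw [rstrip_one_dot _ hlt (nddB_take s2 15 hndd)]
    unfold aPad aFin bFinal
    rw [if_neg (show ¬((s2.take 15).length ≤ 2) by rw [hlen]; omega),
      pyGet_neg_one, if_pos hlt,
      if_pos (show 3 ≤ (s2.take 15).dropLast.length by
        rw [List.length_dropLast, hlen]; omega)]
  · rw [rstrip_no_dot _ hlt]
    unfold aPad aFin bFinal
    by_cases h3 : 3 ≤ (s2.take 15).length
    · rw [if_neg (show ¬((s2.take 15).length ≤ 2) by omega),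
        pyGet_neg_one, if_neg hlt, if_pos h3]
    · rw [if_pos (show (s2.take 15).length ≤ 2 by omega), if_neg h3, pad_foldl _ _ htne]
      have hk : 3 - (s2.take 15).length ≠ 0 := by
        have := List.length_pos_iff.mpr htne
        omega
      have hlast2 : (s2.take 15 ++ List.replicate (3 - (s2.take 15).length)
          (((s2.take 15).getLast?).getD 'a')).getLast?
          = some (((s2.take 15).getLast?).getD 'a') := by
        rw [List.getLast?_append, List.getLast?_replicate, if_neg hk]
        simp
      have hcdot : ¬(PySem.List.pyGet? (s2.take 15 ++ List.replicate (3 - (s2.take 15).length)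
          (((s2.take 15).getLast?).getD 'a')) (-1) = some '.') := by
        rw [pyGet_neg_one, hlast2]
        intro e
        injection e with e'
        rcases hc : (s2.take 15).getLast? with _ | c
        · exact absurd (List.getLast?_eq_none_iff.mp hc) htne
        · rw [hc] at e'
          simp only [Option.getD_some] at e'
          exact hlt (by rw [hc, e'])
      rw [if_neg hcdot, pyGet_neg_one]

theorem stages_eq (cs : List Char) :
    aFin (aPad (aTrunc (aFallback (aPop (aLoop cs)))))
      = bFinal (rstripDot (PySem.List.slice (bFb (bPre cs)) none (some 15))) := by
  have h1 : aLoop cs = gsim false ((PySem.Chars.lower cs).filter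
      (fun c => "0123456789abcdefghijklmnopqrstuvwxyz-_.".toList.contains c)) := by
    unfold aLoop
    rw [← List.foldl_filter, foldl_loop_g]
    simp only [List.nil_append, List.isEmpty_nil, Bool.not_true, Bool.false_and]
  set s1 := (PySem.Chars.lower cs).filter
      (fun c => "0123456789abcdefghijklmnopqrstuvwxyz-_.".toList.contains c) with hs1
  have h4 : bPre cs = jne (partsD s1) := by
    unfold bPre
    rw [← hs1, splitOn_eq]
    exact join_filter_eq_jne (partsD s1)
  have h2 : aPop (aLoop cs) = jne (partsD s1) := by
    rw [h1, gsim_false_eq s1]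
    unfold aPop
    by_cases hK : jne (partsD s1) ≠ [] ∧ s1.getLast? = some '.'
    · rw [if_pos hK, if_pos ?pos]
      · exact List.dropLast_concat
      · exact ⟨by simp, by rw [List.getLast?_concat]⟩
    · rw [if_neg hK, List.append_nil, if_neg ?neg]
      intro hcon
      exact ((jne_shape (partsD s1) (partsD_dotfree s1)).2.1) hcon.2
  have h3 : aFallback (jne (partsD s1)) = bFb (jne (partsD s1)) := by
    unfold aFallback bFb
    by_cases hj : jne (partsD s1) = [] <;> simp [hj]
  rw [h2, h3, h4]
  -- properties of the common intermediate value, then the shared tail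
  have hshape := jne_shape (partsD s1) (partsD_dotfree s1)
  by_cases hj : jne (partsD s1) = []
  · have : bFb (jne (partsD s1)) = ['a'] := by unfold bFb; rw [if_pos hj]
    rw [this]
    exact tail_eq ['a'] (by simp) (by simp) (by simp [nddB])
  · have : bFb (jne (partsD s1)) = jne (partsD s1) := by unfold bFb; rw [if_neg hj]
    rw [this]
    exact tail_eq _ hj hshape.2.1 hshape.2.2

-- ===== VERDICT (by name: the statement is the Claim_ definition above) =====
set_option maxHeartbeats 1000000 in
theorem solution_spec : Claim_equal_solution := by
  intro new_id _
  unfold Spec_solution solution solution_alt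
  exact congrArg String.ofList (stages_eq new_id.toList)
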